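-- pv_equiv track=rewrite | github.com/SenneRoot/AOC2020 | day_6/task_2.py | count_answers
-- ===== SOURCE A (Python) =====
-- def count_answers(data):
--     count = 0
--     nPersons = len(data)
--
--     lAnswerMap = {}
--     for pers in data:
--         for ans in pers.strip("\n"):
--             if ans not in lAnswerMap:
--                 lAnswerMap[ans] = 1
--             else:
--                 lAnswerMap[ans] += 1
--
--     for val in lAnswerMap.values():
--         if val == nPersons:
--             count += 1
--
--     return count
-- ===== SOURCE B (Python) =====
-- def count_answers(data):
--     n = len(data)
--     chars = sorted(c for p in data for c in p.strip("\n"))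
--     count = 0
--     run = 0
--     prev = None
--     for c in chars:
--         if c == prev:
--             run += 1
--         else:
--             if prev is not None and run == n:
--                 count += 1
--             run = 1
--             prev = c
--     if prev is not None and run == n:
--         count += 1
--     return count
-- ===== Notes on version B (the rewrite author's own statement) =====
-- stated objective: alternative
-- what changed: B replaces A's dict-of-counts accumulator by flattening all (newline-stripped) characters, sorting them, and counting runs of length len(data) in a single run-length scan.
import Mathlib
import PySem

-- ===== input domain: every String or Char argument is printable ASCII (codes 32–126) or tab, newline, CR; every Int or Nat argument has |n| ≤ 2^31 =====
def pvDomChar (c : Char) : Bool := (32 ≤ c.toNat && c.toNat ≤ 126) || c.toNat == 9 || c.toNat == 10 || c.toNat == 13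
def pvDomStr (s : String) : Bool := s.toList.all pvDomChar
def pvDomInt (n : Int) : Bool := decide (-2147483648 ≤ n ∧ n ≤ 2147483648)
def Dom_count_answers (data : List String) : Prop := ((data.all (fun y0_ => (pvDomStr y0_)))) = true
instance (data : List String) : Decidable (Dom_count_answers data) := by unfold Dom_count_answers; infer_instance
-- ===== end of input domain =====

-- ===== PORT A =====
-- B replaces A's dict accumulator by flatten-sort-then-scan of runs (objective: alternative; return value only, no mutation).
def count_answers (data : List String) : Int :=
  let nPersons : Int := data.length
  let lAnswerMap : PySem.Dict Char Int :=
    data.foldl (fun d pers =>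
      (PySem.Str.stripChars pers "\n").toList.foldl (fun d ans =>
        if d.contains ans = false then d.insert ans 1
        else d.insert ans (d.getD ans 0 + 1)) d)
      PySem.Dict.empty
  lAnswerMap.values.foldl (fun count val => if val == nPersons then count + 1 else count) 0

-- ===== PORT B =====
-- one step of B's run-length scan over the sorted character list (state: count, run, prev)
def pvStepB (n : Int) (s : Int × Int × Option Char) (c : Char) : Int × Int × Option Char :=
  if some c = s.2.2 then (s.1, s.2.1 + 1, s.2.2)
  else ((if s.2.2.isSome ∧ s.2.1 = n then s.1 + 1 else s.1), 1, some c)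

-- B's trailing 'if prev is not None and run == n: count += 1'
def pvFinishB (n : Int) (s : Int × Int × Option Char) : Int :=
  if s.2.2.isSome ∧ s.2.1 = n then s.1 + 1 else s.1

def count_answers_alt (data : List String) : Int :=
  let n : Int := data.length
  let chars : List Char :=
    PySem.List.sorted (data.flatMap (fun p => (PySem.Str.stripChars p "\n").toList)) (fun c => c) false
  pvFinishB n (chars.foldl (pvStepB n) (0, 0, none))

-- ===== PRECONDITION & SPEC =====
def Spec_count_answers (data : List String) (out : Int) : Prop := out = count_answers_alt data
instance (data : List String) (out : Int) : Decidable (Spec_count_answers data out) := by unfold Spec_count_answers; infer_instance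

-- ===== CLAIM (what is proved, stated in full; the proofs are below) =====
def Claim_equal_count_answers : Prop := ∀ (data : List String), Dom_count_answers data → Spec_count_answers data (count_answers data)

-- ===== LEMMAS AND PROOFS =====

-- the common abstract value: number of distinct characters of l whose occurrence count equals n
def pvCard (n : Int) (l : List Char) : Nat :=
  (l.toFinset.filter (fun c => (l.count c : Int) = n)).card

-- A-side: the dict loop body is the counter step
lemma pvA_step (d : PySem.Dict Char Int) (ans : Char) :
    (if d.contains ans = false then d.insert ans 1 else d.insert ans (d.getD ans 0 + 1))
      = d.insert ans (d.getD ans 0 + 1) := by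
  by_cases h : d.contains ans = false
  · simp [h, PySem.Dict.getD_of_not_contains d 0 h]
  · simp [h]

lemma pv_count_map (L : List Char) (f : Char → Int) (v : Int) :
    (L.map f).count v = L.countP (fun x => f x == v) := by
  simp [List.count, List.countP_map]; rfl

lemma pvA_eq (data : List String) :
    count_answers data = (pvCard (data.length : Int)
      (data.flatMap (fun p => (PySem.Str.stripChars p "\n").toList)) : Int) := by
  unfold count_answers
  simp only [← List.foldl_flatMap, pvA_step,
    PySem.Dict.foldl_insert_getD_add_one_eq_counter]
  set chars := data.flatMap (fun p => (PySem.Str.stripChars p "\n").toList) with hc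
  set n : Int := (data.length : Int)
  show ((PySem.Dict.counter chars).items.map (·.2)).foldl
      (fun count val => if val == n then count + 1 else count) 0 = _
  rw [PySem.Dict.items_counter, PySem.List.foldl_beq_add_one]
  rw [List.map_map]
  show (0 : Int) + ((PySem.Set.ofList chars).map (fun k => (chars.count k : Int))).count n = _
  rw [pv_count_map]
  rw [List.countP_eq_length_filter]
  have hnd : (PySem.Set.ofList chars).Nodup := PySem.Set.nodup_ofList chars
  rw [← List.toFinset_card_of_nodup (hnd.filter _), List.toFinset_filter]
  unfold pvCard
  have hfs : (PySem.Set.ofList chars).toFinset = chars.toFinset := by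
    ext c; simp [PySem.Set.mem_ofList]
  rw [hfs]
  norm_num

-- peel the head character group off the card
lemma pvCard_cons (n : Int) (x : Char) (t : List Char) :
    (pvCard n (x :: t) : Int)
      = (if (1 : Int) + (t.count x : Int) = n then 1 else 0)
        + (((t.toFinset.erase x).filter (fun c => (t.count c : Int) = n)).card : Int) := by
  unfold pvCard
  have h1 : (x :: t).toFinset = insert x (t.toFinset.erase x) := by
    ext c; by_cases hc : c = x <;> simp [hc]
  rw [h1, Finset.filter_insert]
  have h2 : ((t.toFinset.erase x).filter (fun c => ((x :: t).count c : Int) = n))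
      = ((t.toFinset.erase x).filter (fun c => (t.count c : Int) = n)) := by
    apply Finset.filter_congr
    intro c hc
    have : c ≠ x := (Finset.mem_erase.mp hc).1
    have hxc : x ≠ c := Ne.symm this
    simp [hxc]
  have hx : x ∉ (t.toFinset.erase x).filter (fun c => (t.count c : Int) = n) := by
    intro h; exact (Finset.mem_erase.mp (Finset.mem_filter.mp h).1).1 rfl
  by_cases hp : ((x :: t).count x : Int) = n
  · have hp' : (1 : Int) + (t.count x : Int) = n := by
      rw [← hp]; simp; ring
    simp only [hp, if_pos, h2]
    rw [Finset.card_insert_of_notMem hx]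
    simp [hp']
    ring
  · have hp' : ¬ ((1 : Int) + (t.count x : Int) = n) := by
      intro h; apply hp; rw [← h]; simp; ring
    simp only [hp, h2, hp']
    simp

-- B-side loop invariant over a sorted tail all of whose elements are ≥ the current run's char
lemma pvB_fold (n k r : Int) (c : Char) (l : List Char)
    (hs : l.Pairwise (· ≤ ·)) (hge : ∀ x ∈ l, c ≤ x) :
    pvFinishB n (l.foldl (pvStepB n) (k, r, some c))
      = k + (if r + (l.count c : Int) = n then 1 else 0)
        + (((l.toFinset.erase c).filter (fun x => (l.count x : Int) = n)).card : Int) := by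
  induction l generalizing k r c with
  | nil =>
    simp [pvFinishB]
    split_ifs <;> simp_all
  | cons x t ih =>
    have htp : t.Pairwise (· ≤ ·) := hs.tail
    have hxt : ∀ y ∈ t, x ≤ y := fun y hy => (List.pairwise_cons.mp hs).1 y hy
    by_cases hx : x = c
    · subst hx
      have hstep : pvStepB n (k, r, some x) x = (k, r + 1, some x) := by
        simp [pvStepB]
      rw [List.foldl_cons, hstep, ih _ _ _ htp (fun y hy => hge y (List.mem_cons_of_mem x hy))]
      have h2 : ((x :: t).toFinset.erase x).filter (fun c => ((x :: t).count c : Int) = n)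
          = (t.toFinset.erase x).filter (fun c => (t.count c : Int) = n) := by
        have he : (x :: t).toFinset.erase x = t.toFinset.erase x := by
          ext c; by_cases hcx : c = x <;> simp [hcx]
        rw [he]
        apply Finset.filter_congr
        intro c hcm
        have hcx : x ≠ c := Ne.symm (Finset.mem_erase.mp hcm).1
        simp [hcx]
      rw [h2]
      have hcnt : (((x :: t).count x : Nat) : Int) = (t.count x : Int) + 1 := by
        simp
      rw [hcnt]
      congr 2
      apply if_congr _ rfl rfl
      omega
    · have hcx : c < x := lt_of_le_of_ne (hge x List.mem_cons_self) fun h => hx h.symm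
      have hcnt : c ∉ t := fun hmem => absurd (le_antisymm (le_of_lt hcx) (hxt c hmem)) (Ne.symm hx)
      have hstep : pvStepB n (k, r, some c) x
          = ((if r = n then k + 1 else k), 1, some x) := by
        simp [pvStepB, hx]
      rw [List.foldl_cons, hstep, ih _ _ _ htp hxt]
      have hcl : c ∉ (x :: t) := by
        intro h; rcases List.mem_cons.mp h with h | h
        · exact hx h.symm
        · exact hcnt h
      have hcc : ((x :: t).count c : Int) = 0 := by
        simp [List.count_eq_zero_of_not_mem hcl]
      have herase : (x :: t).toFinset.erase c = (x :: t).toFinset := by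
        apply Finset.erase_eq_of_notMem
        simp
        exact ⟨fun h => hx h.symm, hcnt⟩
      rw [hcc, herase]
      have hpeel := pvCard_cons n x t
      unfold pvCard at hpeel
      rw [hpeel]
      simp only [add_zero]
      split_ifs <;> ring

lemma pvB_sorted (n : Int) (l : List Char) (hs : l.Pairwise (· ≤ ·)) :
    pvFinishB n (l.foldl (pvStepB n) (0, 0, none)) = (pvCard n l : Int) := by
  cases l with
  | nil => simp [pvFinishB, pvCard]
  | cons x t =>
    have hstep : pvStepB n ((0 : Int), (0 : Int), (none : Option Char)) x = (0, 1, some x) := by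
      simp [pvStepB]
    rw [List.foldl_cons, hstep,
      pvB_fold n 0 1 x t hs.tail (fun y hy => (List.pairwise_cons.mp hs).1 y hy)]
    rw [pvCard_cons]
    ring

lemma pvCard_perm (n : Int) (l l' : List Char) (h : l.Perm l') : pvCard n l = pvCard n l' := by
  unfold pvCard
  rw [List.toFinset_eq_of_perm _ _ h]
  congr 1
  apply Finset.filter_congr
  intro c _
  rw [h.count_eq]

-- ===== VERDICT (by name: the statement is the Claim_ definition above) =====
theorem count_answers_spec : Claim_equal_count_answers := by
  intro data _
  unfold Spec_count_answers count_answers_alt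
  rw [pvA_eq]
  have hperm := PySem.List.sorted_perm
    (xs := data.flatMap (fun p => (PySem.Str.stripChars p "\n").toList)) (key := fun c => c) (rev := false)
  rw [pvCard_perm _ _ _ hperm.symm]
  exact (pvB_sorted _ _ (PySem.List.sorted_pairwise _ _)).symm
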